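-- pv_equiv track=rewrite | github.com/jessiew1/Browser_extension | kdd_crypten/Benchmark.py | merge_sort_worst_helper
-- ===== SOURCE A (Python) =====
-- def merge_sort_worst_helper(number_of_wires, left, right):
--     if left > right: return number_of_wires
--     if left == right: return number_of_wires
--
--     mid = (left + right + 1) // 2
--
--     number_of_wires = merge_sort_worst_helper(number_of_wires, left, mid - 1)
--     number_of_wires = merge_sort_worst_helper(number_of_wires, mid, right)
--
--     left_index = left
--     right_index = mid
--
--     while left_index < mid:
--         number_of_wires += 1
--         left_index += 1
--     while right_index < right:
--         number_of_wires += 1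
--         right_index += 1
--
--     return number_of_wires
-- ===== SOURCE B (Python) =====
-- def merge_sort_worst_helper(number_of_wires, left, right):
--     # closed form: worst-case merge wires for a span of n elements is
--     # n*ceil(log2 n) - 2^ceil(log2 n) + 1
--     n = right - left + 1
--     if n <= 1:
--         return number_of_wires
--     k = (n - 1).bit_length()
--     return number_of_wires + n * k - (1 << k) + 1
-- ===== Notes on version B (the rewrite author's own statement) =====
-- stated objective: faster
-- what changed: Replaces the O(n log n) recursion with per-element while loops by the closed-form worst-case merge count n*ceil(log2 n) - 2^ceil(log2 n) + 1 computed from bit_length.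
import Mathlib
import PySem

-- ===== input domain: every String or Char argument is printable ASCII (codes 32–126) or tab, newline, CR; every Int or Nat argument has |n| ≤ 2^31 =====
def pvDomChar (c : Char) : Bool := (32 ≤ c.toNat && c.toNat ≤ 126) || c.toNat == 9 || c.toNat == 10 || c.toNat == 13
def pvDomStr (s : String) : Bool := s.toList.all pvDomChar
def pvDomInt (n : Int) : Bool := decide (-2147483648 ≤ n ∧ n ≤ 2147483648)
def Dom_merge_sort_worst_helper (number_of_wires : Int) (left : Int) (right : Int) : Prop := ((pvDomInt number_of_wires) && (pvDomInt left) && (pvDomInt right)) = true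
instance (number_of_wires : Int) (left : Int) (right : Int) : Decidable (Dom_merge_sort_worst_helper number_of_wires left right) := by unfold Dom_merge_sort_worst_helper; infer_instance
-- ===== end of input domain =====

-- B replaces A's recursion with per-element while loops by the closed-form
-- worst-case merge count n*ceil(log2 n) - 2^ceil(log2 n) + 1 (objective: faster).


-- ===== PORT A =====
-- port of 'while i < bound: acc += 1; i += 1'
def pvCountWhile (acc : Int) (i : Int) (bound : Int) : Int :=
  if i < bound then pvCountWhile (acc + 1) (i + 1) bound else acc
termination_by (bound - i).toNat
decreasing_by omega

def merge_sort_worst_helper (number_of_wires : Int) (left : Int) (right : Int) : Int :=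
  if left > right then number_of_wires
  else if left = right then number_of_wires
  else
    let mid := PySem.Int.floordiv (left + right + 1) 2
    let w1 := merge_sort_worst_helper number_of_wires left (mid - 1)
    let w2 := merge_sort_worst_helper w1 mid right
    let w3 := pvCountWhile w2 left mid
    pvCountWhile w3 mid right
termination_by (right - left).toNat
decreasing_by
  all_goals rw [PySem.Int.floordiv_eq_ediv_of_pos (by norm_num)] at *
  all_goals omega

-- ===== PORT B =====
def merge_sort_worst_helper_alt (number_of_wires : Int) (left : Int) (right : Int) : Int :=
  let n := right - left + 1
  if n ≤ 1 then number_of_wires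
  else
    let k : Nat := Nat.size (n - 1).toNat   -- (n-1).bit_length()
    number_of_wires + n * k - 2 ^ k + 1

-- ===== PRECONDITION & SPEC =====
def Spec_merge_sort_worst_helper (number_of_wires : Int) (left : Int) (right : Int) (out : Int) : Prop := out = merge_sort_worst_helper_alt number_of_wires left right
instance (number_of_wires : Int) (left : Int) (right : Int) (out : Int) : Decidable (Spec_merge_sort_worst_helper number_of_wires left right out) := by unfold Spec_merge_sort_worst_helper; infer_instance

-- ===== CLAIM (what is proved, stated in full; the proofs are below) =====
def Claim_equal_merge_sort_worst_helper : Prop := ∀ (number_of_wires : Int) (left : Int) (right : Int), Dom_merge_sort_worst_helper number_of_wires left right → Spec_merge_sort_worst_helper number_of_wires left right (merge_sort_worst_helper number_of_wires left right)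

-- ===== LEMMAS AND PROOFS =====

-- the closed-form count, as a function of the span length
def pvF (n : Nat) : Int := (n : Int) * (Nat.size (n - 1)) - 2 ^ (Nat.size (n - 1)) + 1

lemma pvCountWhile_eq (acc i bound : Int) : pvCountWhile acc i bound = acc + ((bound - i).toNat : Int) := by
  rw [pvCountWhile]
  split
  · rw [pvCountWhile_eq (acc + 1) (i + 1) bound]; omega
  · omega
termination_by (bound - i).toNat
decreasing_by omega

lemma pvSize_eq (n j : Nat) (h1 : 2 ^ j ≤ n) (h2 : n < 2 ^ (j + 1)) : Nat.size n = j + 1 := by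
  have a : Nat.size n ≤ j + 1 := Nat.size_le.mpr h2
  have b : j < Nat.size n := Nat.lt_size.mpr h1
  omega

lemma pvSize_pow_sub_one (j : Nat) : Nat.size (2 ^ j - 1) = j := by
  cases j with
  | zero => simp
  | succ j =>
    have hp : (0:Nat) < 2 ^ j := Nat.two_pow_pos j
    have hq : (2:Nat) ^ (j + 1) = 2 ^ j * 2 := pow_succ 2 j
    exact pvSize_eq _ j (by omega) (by omega)

-- recurrence of the closed form
lemma pvF_rec (n : Nat) (hn : 2 ≤ n) : pvF n = pvF (n / 2) + pvF ((n + 1) / 2) + (n : Int) - 1 := by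
  set k := Nat.size (n - 1) with hk
  have hub : n - 1 < 2 ^ k := Nat.lt_size_self (n - 1)
  have hk1 : 1 ≤ k := Nat.lt_size.mpr (by omega)
  have hlb : 2 ^ (k - 1) ≤ n - 1 := Nat.lt_size.mp (by omega)
  rcases Nat.lt_or_ge k 2 with hk2 | hk2
  · -- k = 1, so n = 2
    have hk' : k = 1 := by omega
    rw [hk'] at hub hlb
    have hn2 : n = 2 := by norm_num at hub hlb; omega
    subst hn2; decide
  · -- k ≥ 2
    obtain ⟨j, hj⟩ : ∃ j, k = j + 2 := ⟨k - 2, by omega⟩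
    have hp : (0:Nat) < 2 ^ j := Nat.two_pow_pos j
    have hpow1 : (2:Nat) ^ (k - 1) = 2 * 2 ^ j := by
      rw [hj, show j + 2 - 1 = j + 1 from rfl, pow_succ]; ring
    have hpow2 : (2:Nat) ^ k = 4 * 2 ^ j := by
      rw [hj, pow_succ, pow_succ]; ring
    rw [hpow1] at hlb; rw [hpow2] at hub
    -- bound the halves
    have hm : Nat.size ((n + 1) / 2 - 1) = j + 1 := by
      apply pvSize_eq
      · omega
      · rw [pow_succ]; omega
    have hsplit : (n:Int) / 2 + (n + 1) / 2 = n := by omega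
    rcases Nat.lt_or_ge (2 * 2 ^ j + 1) n with hbig | hsmall
    · -- n ≥ 2*2^j + 2 : the floor half also has size j+1
      have hf : Nat.size (n / 2 - 1) = j + 1 := by
        apply pvSize_eq
        · omega
        · rw [pow_succ]; omega
      unfold pvF
      rw [hf, hm, ← hk, hj]
      have hab : ((n / 2 : Nat) : Int) + (((n + 1) / 2 : Nat) : Int) = (n : Int) := by omega
      generalize hA : ((n / 2 : Nat) : Int) = A at hab ⊢
      generalize hB : (((n + 1) / 2 : Nat) : Int) = B at hab ⊢
      push_cast
      linear_combination (-(j : Int) - 1) * hab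
    · -- n = 2*2^j + 1 : floor half is exactly 2^j, size j
      have hn' : n = 2 * 2 ^ j + 1 := by omega
      have hf2 : n / 2 = 2 ^ j := by omega
      have hf : Nat.size (n / 2 - 1) = j := by rw [hf2]; exact pvSize_pow_sub_one j
      unfold pvF
      rw [hf, hm, ← hk, hj]
      have c1 : ((n / 2 : Nat) : Int) = 2 ^ j := by rw [hf2]; push_cast; ring
      have c2 : (((n + 1) / 2 : Nat) : Int) = 2 ^ j + 1 := by
        have : (n + 1) / 2 = 2 ^ j + 1 := by omega
        rw [this]; push_cast; ring
      have c3 : (n : Int) = 2 * 2 ^ j + 1 := by rw [hn']; push_cast; ring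
      rw [c1, c2, c3]
      push_cast
      ring

lemma pvF_zero : pvF 0 = 0 := by decide
lemma pvF_one : pvF 1 = 0 := by decide

lemma pvA_eq (w l r : Int) : merge_sort_worst_helper w l r = w + pvF ((r - l + 1).toNat) := by
  rw [merge_sort_worst_helper]
  by_cases h1 : l > r
  · have : (r - l + 1).toNat = 0 := by omega
    rw [if_pos h1, this, pvF_zero]; ring
  · by_cases h2 : l = r
    · have : (r - l + 1).toNat = 1 := by omega
      rw [if_neg h1, if_pos h2, this, pvF_one]; ring
    · rw [if_neg h1, if_neg h2]
      have hlr : l < r := by omega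
      have hmid : PySem.Int.floordiv (l + r + 1) 2 = (l + r + 1) / 2 :=
        PySem.Int.floordiv_eq_ediv_of_pos (by norm_num)
      simp only [hmid]
      rw [pvA_eq w l ((l + r + 1) / 2 - 1), pvA_eq _ ((l + r + 1) / 2) r,
          pvCountWhile_eq, pvCountWhile_eq]
      set n := (r - l + 1).toNat with hn
      have hn2 : 2 ≤ n := by omega
      have e1 : ((l + r + 1) / 2 - 1 - l + 1).toNat = n / 2 := by omega
      have e2 : (r - (l + r + 1) / 2 + 1).toNat = (n + 1) / 2 := by omega
      have e3 : (((l + r + 1) / 2 - l).toNat : Int) + ((r - (l + r + 1) / 2).toNat : Int)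
          = (n : Int) - 1 := by omega
      rw [e1, e2, pvF_rec n hn2]
      generalize pvF (n / 2) = F1
      generalize pvF ((n + 1) / 2) = F2
      omega
termination_by (r - l).toNat
decreasing_by all_goals omega

-- ===== VERDICT (by name: the statement is the Claim_ definition above) =====
theorem merge_sort_worst_helper_spec : Claim_equal_merge_sort_worst_helper := by
  intro w l r _
  unfold Spec_merge_sort_worst_helper merge_sort_worst_helper_alt
  rw [pvA_eq]
  simp only []
  by_cases h : r - l + 1 ≤ 1
  · rw [if_pos h]
    have : (r - l + 1).toNat = 0 ∨ (r - l + 1).toNat = 1 := by omega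
    rcases this with h' | h' <;> rw [h'] <;> simp [pvF_zero, pvF_one]
  · rw [if_neg h]
    unfold pvF
    have e : ((r - l + 1).toNat : Int) = r - l + 1 := by omega
    have e2 : (r - l + 1).toNat - 1 = (r - l + 1 - 1).toNat := by omega
    rw [e2, e]
    ring
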